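-- pv_equiv track=rewrite | github.com/joalone/aoc-2025 | day10.py | min_steps_light
-- ===== SOURCE A (Python) =====
-- from collections import deque
--
-- def min_steps_light(light, wirings):
--     if light == 0:
--         return 0
--     queue = deque((1, w) for w in wirings)
--     visited = set()
--     while queue:
--         i, state = queue.popleft()
--         if state == light:
--             return i
--         if state not in visited:
--             queue.extend((i + 1, state ^ w) for w in wirings)
--             visited.add(state)
--     return None
-- ===== SOURCE B (Python) =====
-- def min_steps_light(light, wirings):
--     if light == 0:
--         return 0
--     visited = set()
--     frontier = set(wirings)
--     d = 1
--     while frontier: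
--         if light in frontier:
--             return d
--         visited |= frontier
--         frontier = {s ^ w for s in frontier for w in wirings} - visited
--         d += 1
--     return None
-- ===== Notes on version B (the rewrite author's own statement) =====
-- stated objective: faster
-- what changed: Replaces A's per-element (distance, state) deque BFS with a level-synchronous BFS that expands whole frontier sets (next frontier = {s^w for s in frontier} minus visited) and counts levels with a distance variable.
import Mathlib
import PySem

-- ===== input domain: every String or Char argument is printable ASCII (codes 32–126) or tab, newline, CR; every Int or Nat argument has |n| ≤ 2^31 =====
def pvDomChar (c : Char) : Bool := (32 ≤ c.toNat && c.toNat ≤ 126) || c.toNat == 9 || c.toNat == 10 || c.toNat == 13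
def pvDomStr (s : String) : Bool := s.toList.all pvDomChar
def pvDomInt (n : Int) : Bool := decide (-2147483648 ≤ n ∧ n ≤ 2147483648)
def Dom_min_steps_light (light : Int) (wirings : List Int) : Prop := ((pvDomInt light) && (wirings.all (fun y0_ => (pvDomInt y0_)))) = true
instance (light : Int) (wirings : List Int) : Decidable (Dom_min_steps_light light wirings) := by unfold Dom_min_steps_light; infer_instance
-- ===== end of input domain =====

-- B replaces A's per-element (distance, state) deque BFS by a level-synchronous BFS on whole frontier sets;
-- same return value everywhere, different loop decomposition.
-- Both loops terminate in Python (states stay inside a finite xor-closed range); the Lean ports carry a fuel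
-- counter proved large enough on the stated domain, so it never runs out there.

-- ===== PORT A =====
-- fuel: one unit per queue pop; proved sufficient on Dom (states stay in [-2^32, 2^32), see pvU below)
def pvFuelA (W : List Int) : Nat := W.length + 8589934592 * (W.length + 1) + 1

def pvStepA (light : Int) (W : List Int) : Nat → List (Int × Int) → PySem.Set Int → Option Int
  | 0, _, _ => none
  | _ + 1, [], _ => none
  | f + 1, (i, s) :: q, vis =>
    if s = light then some i
    else if PySem.Set.contains vis s then pvStepA light W f q vis
    else pvStepA light W f (q ++ W.map (fun w => (i + 1, PySem.Int.bxor s w))) (PySem.Set.add vis s)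

def min_steps_light (light : Int) (wirings : List Int) : Option Int :=
  if light = 0 then some 0
  else pvStepA light wirings (pvFuelA wirings) (wirings.map (fun w => ((1 : Int), w))) PySem.Set.empty

-- ===== PORT B =====
-- fuel: one unit per BFS level; proved sufficient on Dom
def pvFuelB : Nat := 8589934594

-- {s ^ w for s in frontier for w in wirings} - visited
def pvNextB (W : List Int) (vis fr : PySem.Set Int) : PySem.Set Int :=
  PySem.Set.diff (PySem.Set.ofList (fr.flatMap (fun s => W.map (fun w => PySem.Int.bxor s w)))) vis

def pvStepB (light : Int) (W : List Int) : Nat → Int → PySem.Set Int → PySem.Set Int → Option Int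
  | 0, _, _, _ => none
  | f + 1, d, vis, fr =>
    if fr = [] then none
    else if PySem.Set.contains fr light then some d
    else
      let vis' := PySem.Set.union vis fr
      pvStepB light W f (d + 1) vis' (pvNextB W vis' fr)

def min_steps_light_alt (light : Int) (wirings : List Int) : Option Int :=
  if light = 0 then some 0
  else pvStepB light wirings pvFuelB 1 PySem.Set.empty (PySem.Set.ofList wirings)

-- ===== PRECONDITION & SPEC =====
def Spec_min_steps_light (light : Int) (wirings : List Int) (out : Option Int) : Prop := out = min_steps_light_alt light wirings
instance (light : Int) (wirings : List Int) (out : Option Int) : Decidable (Spec_min_steps_light light wirings out) := by unfold Spec_min_steps_light; infer_instance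

-- ===== CLAIM (what is proved, stated in full; the proofs are below) =====
def Claim_equal_min_steps_light : Prop := ∀ (light : Int) (wirings : List Int), Dom_min_steps_light light wirings → Spec_min_steps_light light wirings (min_steps_light light wirings)

-- ===== LEMMAS AND PROOFS =====

-- finite universe of reachable states: 33-bit two's-complement range, closed under xor
noncomputable def pvU : Finset Int := Finset.Icc (-(4294967296 : Int)) 4294967295

theorem pvU_card : pvU.card = 8589934592 := by
  rw [pvU, Int.card_Icc]; rfl

theorem pvBxor_mem (a b : Int) (ha : a ∈ pvU) (hb : b ∈ pvU) : PySem.Int.bxor a b ∈ pvU := by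
  rw [pvU, Finset.mem_Icc] at *
  have h32 : (4294967296 : Nat) = 2 ^ 32 := by norm_num
  unfold PySem.Int.bxor
  split_ifs with h1 h2 h2 <;>
  · first
    | (have hx : a.toNat < 2 ^ 32 := by omega
       have hy : b.toNat < 2 ^ 32 := by omega
       have := Nat.xor_lt_two_pow hx hy
       omega)
    | (have hx : a.toNat < 2 ^ 32 := by omega
       have hy : (-b - 1).toNat < 2 ^ 32 := by omega
       have := Nat.xor_lt_two_pow hx hy
       omega)
    | (have hx : (-a - 1).toNat < 2 ^ 32 := by omega
       have hy : b.toNat < 2 ^ 32 := by omega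
       have := Nat.xor_lt_two_pow hx hy
       omega)
    | (have hx : (-a - 1).toNat < 2 ^ 32 := by omega
       have hy : (-b - 1).toNat < 2 ^ 32 := by omega
       have := Nat.xor_lt_two_pow hx hy
       omega)

theorem pvNodup_length_le (l : List Int) (hn : l.Nodup) (hU : ∀ x ∈ l, x ∈ pvU) :
    l.length ≤ 8589934592 := by
  have h1 : l.toFinset ⊆ pvU := fun x hx => hU x (List.mem_toFinset.mp hx)
  have h2 := Finset.card_le_card h1
  rwa [List.toFinset_card_of_nodup hn, pvU_card] at h2

theorem pvUnion_length_lt (vis fr : PySem.Set Int) (hn : vis.Nodup)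
    (x : Int) (hx : x ∈ fr) (hxv : x ∉ vis) :
    vis.length + 1 ≤ (PySem.Set.union vis fr).length := by
  have hnu : (PySem.Set.union vis fr).Nodup := PySem.Set.nodup_union _ _ hn
  have hsub : vis.toFinset ⊂ (PySem.Set.union vis fr).toFinset := by
    constructor
    · intro y hy
      rw [List.mem_toFinset] at *
      exact (PySem.Set.mem_union _ _ _).mpr (Or.inl hy)
    · intro hcon
      have : x ∈ vis.toFinset := hcon (List.mem_toFinset.mpr ((PySem.Set.mem_union _ _ _).mpr (Or.inr hx)))
      exact hxv (List.mem_toFinset.mp this)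
  have := Finset.card_lt_card hsub
  rwa [List.toFinset_card_of_nodup hn, List.toFinset_card_of_nodup hnu] at this

-- A's processing of one whole BFS level: scan the pending states, expanding unvisited ones
def pvExpand (W : List Int) : List Int → PySem.Set Int → List Int × PySem.Set Int
  | [], vis => ([], vis)
  | s :: p, vis =>
    if PySem.Set.contains vis s then pvExpand W p vis
    else
      let r := pvExpand W p (PySem.Set.add vis s)
      (W.map (fun w => PySem.Int.bxor s w) ++ r.1, r.2)

theorem pvExpand_snd_mem (W : List Int) (x : Int) :
    ∀ (p : List Int) (vis : PySem.Set Int),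
      x ∈ (pvExpand W p vis).2 ↔ x ∈ vis ∨ x ∈ p := by
  intro p
  induction p with
  | nil => intro vis; simp [pvExpand]
  | cons s p ih =>
    intro vis
    by_cases hc : s ∈ vis
    · rw [pvExpand, if_pos ((PySem.Set.contains_iff _ _).mpr hc), ih]
      constructor
      · rintro (h | h) <;> simp_all
      · rintro (h | h)
        · exact Or.inl h
        · rcases List.mem_cons.mp h with h | h
          · exact Or.inl (h ▸ hc)
          · exact Or.inr h
    · rw [pvExpand, if_neg (by simp [hc])]
      simp only [ih, PySem.Set.mem_add, List.mem_cons]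
      tauto

theorem pvExpand_fst_mem (W : List Int) (x : Int) :
    ∀ (p : List Int) (vis : PySem.Set Int),
      x ∈ (pvExpand W p vis).1 ↔
        ∃ s, s ∈ p ∧ s ∉ vis ∧ ∃ w, w ∈ W ∧ x = PySem.Int.bxor s w := by
  intro p
  induction p with
  | nil => intro vis; simp [pvExpand]
  | cons s p ih =>
    intro vis
    by_cases hc : s ∈ vis
    · rw [pvExpand, if_pos ((PySem.Set.contains_iff _ _).mpr hc), ih]
      constructor
      · rintro ⟨s', h1, h2, hw⟩; exact ⟨s', List.mem_cons_of_mem _ h1, h2, hw⟩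
      · rintro ⟨s', h1, h2, hw⟩
        rcases List.mem_cons.mp h1 with rfl | h1
        · exact absurd hc h2
        · exact ⟨s', h1, h2, hw⟩
    · rw [pvExpand, if_neg (by simp [hc])]
      simp only [List.mem_append, List.mem_map, ih, PySem.Set.mem_add]
      constructor
      · rintro (⟨w, hw, rfl⟩ | ⟨s', h1, h2, hw⟩)
        · exact ⟨s, List.mem_cons_self, hc, w, hw, rfl⟩
        · exact ⟨s', List.mem_cons_of_mem _ h1, fun h => h2 (Or.inl h), hw⟩
      · rintro ⟨s', h1, h2, w, hw, rfl⟩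
        rcases List.mem_cons.mp h1 with rfl | h1
        · exact Or.inl ⟨w, hw, rfl⟩
        · by_cases hss : s' = s
          · exact Or.inl (hss ▸ ⟨w, hw, rfl⟩)
          · exact Or.inr ⟨s', h1, fun h => (h.elim h2 hss), w, hw, rfl⟩

theorem pvExpand_snd_nodup (W : List Int) :
    ∀ (p : List Int) (vis : PySem.Set Int), vis.Nodup → (pvExpand W p vis).2.Nodup := by
  intro p
  induction p with
  | nil => intro vis h; simpa [pvExpand]
  | cons s p ih =>
    intro vis h
    by_cases hc : s ∈ vis
    · rw [pvExpand, if_pos ((PySem.Set.contains_iff _ _).mpr hc)]; exact ih vis h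
    · rw [pvExpand, if_neg (by simp [hc])]
      exact ih _ (PySem.Set.nodup_add _ _ h)

theorem pvExpand_bound (W : List Int) :
    ∀ (p : List Int) (vis : PySem.Set Int), vis.Nodup → (∀ x ∈ vis, x ∈ pvU) → (∀ x ∈ p, x ∈ pvU) →
      (pvExpand W p vis).1.length + (8589934592 - (pvExpand W p vis).2.length) * (W.length + 1)
        ≤ (8589934592 - vis.length) * (W.length + 1) := by
  intro p
  induction p with
  | nil => intro vis _ _ _; simp [pvExpand]
  | cons s p ih =>
    intro vis hn hUv hUp
    by_cases hc : s ∈ vis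
    · rw [pvExpand, if_pos ((PySem.Set.contains_iff _ _).mpr hc)]
      exact ih vis hn hUv (fun x hx => hUp x (List.mem_cons_of_mem _ hx))
    · rw [pvExpand, if_neg (by simp [hc])]
      have hadd : PySem.Set.add vis s = vis ++ [s] := PySem.Set.add_of_not_mem hc
      have hn' : (PySem.Set.add vis s).Nodup := PySem.Set.nodup_add _ _ hn
      have hUv' : ∀ x ∈ PySem.Set.add vis s, x ∈ pvU := by
        intro x hx
        rcases (PySem.Set.mem_add _ _ _).mp hx with h | rfl
        · exact hUv x h
        · exact hUp x (List.mem_cons_self)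
      have hlen : (PySem.Set.add vis s).length = vis.length + 1 := by
        rw [hadd]; simp
      have hle : vis.length + 1 ≤ 8589934592 := by
        have := pvNodup_length_le (PySem.Set.add vis s) hn' hUv'
        omega
      have hstep := ih (PySem.Set.add vis s) hn' hUv' (fun x hx => hUp x (List.mem_cons_of_mem _ hx))
      rw [hlen] at hstep
      have hB : (8589934592 - vis.length) * (W.length + 1)
          = (8589934592 - (vis.length + 1)) * (W.length + 1) + (W.length + 1) := by
        have h : 8589934592 - vis.length = (8589934592 - (vis.length + 1)) + 1 := by omega
        rw [h, add_mul, one_mul]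
      simp only [List.length_append, List.length_map]
      omega

-- A pops in level order; if light occurs among the level's pending states it returns the level's distance
theorem pvStepA_hit (light : Int) (W : List Int) (i : Int) :
    ∀ (p : List Int) (fA : Nat) (rest : List (Int × Int)) (vis : PySem.Set Int),
      light ∈ p → p.length ≤ fA →
      pvStepA light W fA (p.map (fun s => (i, s)) ++ rest) vis = some i := by
  intro p
  induction p with
  | nil => intro fA rest vis h; simp at h
  | cons s p ih =>
    intro fA rest vis h hf
    obtain ⟨f, rfl⟩ : ∃ f, fA = f + 1 := ⟨fA - 1, by simp at hf; omega⟩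
    by_cases hs : s = light
    · simp [pvStepA, hs]
    · have hl : light ∈ p := by
        rcases List.mem_cons.mp h with h | h
        · exact absurd h.symm hs
        · exact h
      by_cases hc : s ∈ vis
      · have hc' : PySem.Set.contains vis s = true := (PySem.Set.contains_iff _ _).mpr hc
        simp only [List.map_cons, List.cons_append, pvStepA]
        rw [if_neg hs, if_pos hc']
        exact ih f rest vis hl (by simpa using hf)
      · have hc' : ¬ PySem.Set.contains vis s = true := by
          simpa [PySem.Set.contains_iff] using hc
        simp only [List.map_cons, List.cons_append, pvStepA]
        rw [if_neg hs, if_neg hc', List.append_assoc]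
        exact ih f _ _ hl (by simpa using hf)

-- if every pending state is already visited (and not the light), A drains the queue and returns None
theorem pvStepA_drain (light : Int) (W : List Int) (i : Int) :
    ∀ (p : List Int) (fA : Nat) (vis : PySem.Set Int),
      (∀ x ∈ p, x ∈ vis ∧ x ≠ light) → p.length + 1 ≤ fA →
      pvStepA light W fA (p.map (fun s => (i, s))) vis = none := by
  intro p
  induction p with
  | nil =>
    intro fA vis _ hf
    obtain ⟨f, rfl⟩ : ∃ f, fA = f + 1 := ⟨fA - 1, by omega⟩
    simp [pvStepA]
  | cons s p ih =>
    intro fA vis h hf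
    obtain ⟨f, rfl⟩ : ∃ f, fA = f + 1 := ⟨fA - 1, by simp at hf; omega⟩
    obtain ⟨hv, hs⟩ := h s (List.mem_cons_self)
    have hc' : PySem.Set.contains vis s = true := (PySem.Set.contains_iff _ _).mpr hv
    simp only [List.map_cons, pvStepA]
    rw [if_neg hs, if_pos hc']
    exact ih f vis (fun x hx => h x (List.mem_cons_of_mem _ hx)) (by simpa using hf)

-- processing one whole level rewrites A's queue into the next level's queue
theorem pvStepA_level (light : Int) (W : List Int) (i : Int) :
    ∀ (p : List Int) (fA : Nat) (acc : List Int) (vis : PySem.Set Int),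
      (∀ x ∈ p, x ≠ light) → p.length ≤ fA →
      pvStepA light W fA (p.map (fun s => (i, s)) ++ acc.map (fun s => (i + 1, s))) vis
        = pvStepA light W (fA - p.length)
            ((acc ++ (pvExpand W p vis).1).map (fun s => (i + 1, s))) (pvExpand W p vis).2 := by
  intro p
  induction p with
  | nil => intro fA acc vis _ _; simp [pvExpand]
  | cons s p ih =>
    intro fA acc vis h hf
    obtain ⟨f, rfl⟩ : ∃ f, fA = f + 1 := ⟨fA - 1, by simp at hf; omega⟩
    have hs : s ≠ light := h s (List.mem_cons_self)
    have hrest : ∀ x ∈ p, x ≠ light := fun x hx => h x (List.mem_cons_of_mem _ hx)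
    by_cases hc : s ∈ vis
    · have hc' : PySem.Set.contains vis s = true := (PySem.Set.contains_iff _ _).mpr hc
      simp only [List.map_cons, List.cons_append, pvStepA]
      rw [if_neg hs, if_pos hc']
      rw [ih f acc vis hrest (by simpa using hf)]
      rw [pvExpand, if_pos hc']
      congr 1
      simp
    · have hc' : ¬ PySem.Set.contains vis s = true := by
        simpa [PySem.Set.contains_iff] using hc
      simp only [List.map_cons, List.cons_append, pvStepA]
      rw [if_neg hs, if_neg hc']
      have hq : (p.map (fun s => (i, s)) ++ acc.map (fun s => (i + 1, s)))
            ++ W.map (fun w => (i + 1, PySem.Int.bxor s w))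
          = p.map (fun s => (i, s))
            ++ (acc ++ W.map (fun w => PySem.Int.bxor s w)).map (fun s => (i + 1, s)) := by
        rw [List.append_assoc, List.map_append, List.map_map]
        rfl
      rw [hq, ih f _ _ hrest (by simpa using hf)]
      rw [pvExpand, if_neg hc']
      simp only [List.length_cons]
      congr 1
      · omega
      · rw [List.append_assoc]

-- the level-by-level simulation: A's queue BFS and B's frontier BFS return the same answer
theorem pvSim (light : Int) (W : List Int) (hWU : ∀ x ∈ W, x ∈ pvU) :
    ∀ (fB : Nat) (i : Int) (p : List Int) (visA visB frB : PySem.Set Int) (fA : Nat),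
      visA.Nodup → visB.Nodup →
      (∀ x ∈ visA, x ∈ pvU) → (∀ x ∈ visB, x ∈ pvU) → (∀ x ∈ p, x ∈ pvU) →
      (∀ x, x ∈ visA ↔ x ∈ visB) →
      (∀ x, x ∈ frB ↔ (x ∈ p ∧ x ∉ visA)) →
      light ∉ visA →
      p.length + (8589934592 - visA.length) * (W.length + 1) + 1 ≤ fA →
      8589934592 + 1 - visB.length ≤ fB →
      pvStepA light W fA (p.map (fun s => (i, s))) visA = pvStepB light W fB i visB frB := by
  intro fB
  induction fB with
  | zero =>
    intro i p visA visB frB fA _ hnB _ hUB _ _ _ _ _ hfB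
    have := pvNodup_length_le visB hnB hUB
    omega
  | succ f ih =>
    intro i p visA visB frB fA hnA hnB hUA hUB hUp h1 h2 h3 hfA hfB
    by_cases hfre : frB = []
    · -- B returns none; A drains its (all-visited) pending states and returns none
      subst hfre
      rw [pvStepB, if_pos rfl]
      apply pvStepA_drain
      · intro x hx
        have hxv : x ∈ visA := by
          by_contra hxa
          exact (List.not_mem_nil (a := x)).elim ((h2 x).mpr ⟨hx, hxa⟩)
        exact ⟨hxv, fun hxl => h3 (hxl ▸ hxv)⟩
      · omega
    · by_cases hl : light ∈ frB
      · -- both return the current distance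
        rw [pvStepB, if_neg hfre, if_pos ((PySem.Set.contains_iff _ _).mpr hl)]
        have hlp : light ∈ p := ((h2 light).mp hl).1
        have := pvStepA_hit light W i p fA [] visA hlp (by omega)
        simpa using this
      · -- neither level contains the light: advance both by one level
        have hnl : ∀ x ∈ p, x ≠ light := by
          intro x hx hxl
          subst hxl
          by_cases hxa : x ∈ visA
          · exact h3 hxa
          · exact hl ((h2 x).mpr ⟨hx, hxa⟩)
        rw [pvStepB, if_neg hfre, if_neg (by simp [hl])]
        have hlvl := pvStepA_level light W i p fA [] visA hnl (by omega)
        simp only [List.map_nil, List.nil_append, List.append_nil] at hlvl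
        rw [hlvl]
        -- invariants for the next level
        have hE2 : ∀ x, x ∈ (pvExpand W p visA).2 ↔ x ∈ visA ∨ x ∈ p := fun x => pvExpand_snd_mem W x p visA
        have hE1 : ∀ x, x ∈ (pvExpand W p visA).1 ↔
            ∃ s, s ∈ p ∧ s ∉ visA ∧ ∃ w, w ∈ W ∧ x = PySem.Int.bxor s w :=
          fun x => pvExpand_fst_mem W x p visA
        have hvisB' : ∀ x, x ∈ PySem.Set.union visB frB ↔ x ∈ visB ∨ x ∈ frB :=
          fun x => PySem.Set.mem_union _ _ x
        have hfrB' : ∀ x, x ∈ pvNextB W (PySem.Set.union visB frB) frB ↔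
            ((∃ s, s ∈ frB ∧ ∃ w, w ∈ W ∧ x = PySem.Int.bxor s w) ∧ x ∉ PySem.Set.union visB frB) := by
          intro x
          rw [pvNextB, PySem.Set.mem_diff, PySem.Set.mem_ofList]
          simp only [List.mem_flatMap, List.mem_map]
          constructor
          · rintro ⟨⟨s, hs, w, hw, rfl⟩, hnv⟩; exact ⟨⟨s, hs, w, hw, rfl⟩, hnv⟩
          · rintro ⟨⟨s, hs, w, hw, rfl⟩, hnv⟩; exact ⟨⟨s, hs, w, hw, rfl⟩, hnv⟩
        obtain ⟨x0, hx0⟩ := List.exists_mem_of_ne_nil frB hfre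
        have hx0v : x0 ∉ visB := fun h => ((h2 x0).mp hx0).2 ((h1 x0).mpr h)
        have hlenB := pvUnion_length_lt visB frB hnB x0 hx0 hx0v
        apply ih (i + 1) (pvExpand W p visA).1 (pvExpand W p visA).2
          (PySem.Set.union visB frB) (pvNextB W (PySem.Set.union visB frB) frB)
        · exact pvExpand_snd_nodup W p visA hnA
        · exact PySem.Set.nodup_union _ _ hnB
        · intro x hx
          rcases (hE2 x).mp hx with h | h
          · exact hUA x h
          · exact hUp x h
        · intro x hx
          rcases (hvisB' x).mp hx with h | h
          · exact hUB x h
          · exact hUp x ((h2 x).mp h).1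
        · intro x hx
          obtain ⟨s, hs, _, w, hw, rfl⟩ := (hE1 x).mp hx
          exact pvBxor_mem s w (hUp s hs) (hWU w hw)
        · intro x
          rw [hE2 x, hvisB' x, ← h1 x, h2 x]
          tauto
        · intro x
          rw [hfrB' x, hE1 x, hE2 x, hvisB' x]
          constructor
          · rintro ⟨⟨s, hs, w, hw, rfl⟩, hnv⟩
            obtain ⟨hsp, hsa⟩ := (h2 s).mp hs
            refine ⟨⟨s, hsp, hsa, w, hw, rfl⟩, ?_⟩
            rintro (h | h)
            · exact hnv (Or.inl ((h1 _).mp h))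
            · by_cases ha : PySem.Int.bxor s w ∈ visA
              · exact hnv (Or.inl ((h1 _).mp ha))
              · exact hnv (Or.inr ((h2 _).mpr ⟨h, ha⟩))
          · rintro ⟨⟨s, hsp, hsa, w, hw, rfl⟩, hnv⟩
            refine ⟨⟨s, (h2 s).mpr ⟨hsp, hsa⟩, w, hw, rfl⟩, ?_⟩
            rintro (h | h)
            · exact hnv (Or.inl ((h1 _).mpr h))
            · exact hnv (Or.inr ((h2 _).mp h).1)
        · intro hcon
          rcases (hE2 light).mp hcon with h | h
          · exact h3 h
          · exact (hnl light h) rfl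
        · have hbnd := pvExpand_bound W p visA hnA hUA hUp
          omega
        · have hle := pvNodup_length_le (PySem.Set.union visB frB) (PySem.Set.nodup_union _ _ hnB)
            (by
              intro x hx
              rcases (hvisB' x).mp hx with h | h
              · exact hUB x h
              · exact hUp x ((h2 x).mp h).1)
          omega

-- ===== VERDICT (by name: the statement is the Claim_ definition above) =====
theorem min_steps_light_spec : Claim_equal_min_steps_light := by
  intro light wirings hDom
  unfold Spec_min_steps_light
  have hWU : ∀ x ∈ wirings, x ∈ pvU := by
    intro x hx
    unfold Dom_min_steps_light at hDom
    simp only [Bool.and_eq_true, List.all_eq_true, pvDomInt, decide_eq_true_eq] at hDom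
    have := hDom.2 x hx
    rw [pvU, Finset.mem_Icc]
    omega
  by_cases h0 : light = 0
  · simp [min_steps_light, min_steps_light_alt, h0]
  · rw [min_steps_light, min_steps_light_alt, if_neg h0, if_neg h0]
    exact pvSim light wirings hWU pvFuelB 1 wirings PySem.Set.empty PySem.Set.empty
      (PySem.Set.ofList wirings) (pvFuelA wirings)
      List.nodup_nil List.nodup_nil
      (by intro x hx; simp [PySem.Set.empty] at hx)
      (by intro x hx; simp [PySem.Set.empty] at hx)
      hWU
      (by intro x; simp [PySem.Set.empty])
      (by intro x; simp [PySem.Set.mem_ofList, PySem.Set.empty])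
      (by simp [PySem.Set.empty])
      (by simp [pvFuelA, PySem.Set.empty])
      (by norm_num [pvFuelB, PySem.Set.empty])
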